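-- pv_equiv track=rewrite | github.com/Huleinpylo/GitOSINT-mcp | src/gitosint_mcp/server.py | _process_commit_activity
-- ===== SOURCE A (Python) =====
-- from typing import Any, Dict, List, Optional, Union
--
-- def _process_commit_activity(activity_data: List[Dict]) -> Dict[str, Any]:
--     """Process commit activity data"""
--     if not activity_data:
--         return {'recent_activity': 0, 'peak_week': 0, 'total_commits': 0}
--
--     total_commits = sum(week.get('total', 0) for week in activity_data)
--     recent_activity = sum(week.get('total', 0) for week in activity_data[-4:])  # Last 4 weeks
--     peak_week = max(week.get('total', 0) for week in activity_data)
--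
--     return {
--         'recent_activity': recent_activity,
--         'peak_week': peak_week,
--         'total_commits': total_commits
--     }
-- ===== SOURCE B (Python) =====
-- def _process_commit_activity(activity_data):
--     """Process commit activity data (divide-and-conquer aggregation)."""
--     if not activity_data:
--         return {'recent_activity': 0, 'peak_week': 0, 'total_commits': 0}
--
--     def agg(weeks):
--         # returns (total, peak) over a nonempty list of weeks
--         if len(weeks) == 1:
--             t = weeks[0].get('total', 0)
--             return (t, t)
--         mid = len(weeks) // 2
--         tl, pl = agg(weeks[:mid])
--         tr, pr = agg(weeks[mid:])
--         return (tl + tr, max(pl, pr))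
--
--     total_commits, peak_week = agg(activity_data)
--
--     recent_activity = 0
--     k = 0
--     for week in reversed(activity_data):
--         if k == 4:
--             break
--         recent_activity += week.get('total', 0)
--         k += 1
--
--     return {
--         'recent_activity': recent_activity,
--         'peak_week': peak_week,
--         'total_commits': total_commits
--     }
-- ===== Notes on version B (the rewrite author's own statement) =====
-- stated objective: alternative
-- what changed: Replaces the three linear generator passes (sum, last-4 slice sum, max) by a recursive divide-and-conquer aggregation that combines (total, peak) pairs over halves, plus a reversed-iteration loop that stops after 4 weeks for recent activity (no slicing).
import Mathlib
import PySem

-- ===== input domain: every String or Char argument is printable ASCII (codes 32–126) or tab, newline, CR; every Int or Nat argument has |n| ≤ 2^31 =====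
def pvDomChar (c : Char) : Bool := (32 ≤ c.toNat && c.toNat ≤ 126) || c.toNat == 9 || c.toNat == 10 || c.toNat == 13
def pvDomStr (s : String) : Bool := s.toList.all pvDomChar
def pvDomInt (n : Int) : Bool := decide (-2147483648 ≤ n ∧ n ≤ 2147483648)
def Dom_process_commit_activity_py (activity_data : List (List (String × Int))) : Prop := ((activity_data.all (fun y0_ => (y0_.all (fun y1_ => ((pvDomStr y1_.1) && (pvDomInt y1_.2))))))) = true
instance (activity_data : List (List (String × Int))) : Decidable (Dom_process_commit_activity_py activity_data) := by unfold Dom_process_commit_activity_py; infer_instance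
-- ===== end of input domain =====

-- B replaces A's three generator passes by a divide-and-conquer (total, peak) aggregation
-- plus a reversed 4-step loop for recent activity; same return value (objective: alternative).

-- week.get('total', 0) — shared getter (both Pythons use the same expression)
def pvWeekTotal (w : List (String × Int)) : Int := ((List.lookup "total" w).getD 0)

-- ===== PORT A =====
def process_commit_activity_py (activity_data : List (List (String × Int))) : List (String × Int) :=
  match activity_data with
  | [] => [("recent_activity", 0), ("peak_week", 0), ("total_commits", 0)]
  | w :: ws =>
    let total_commits := ((w :: ws).map pvWeekTotal).sum
    let recent_activity := ((PySem.List.slice (w :: ws) (some (-4)) none).map pvWeekTotal).sum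
    let peak_week := ws.foldl (fun acc wk => max acc (pvWeekTotal wk)) (pvWeekTotal w)
    [("recent_activity", recent_activity), ("peak_week", peak_week), ("total_commits", total_commits)]

-- ===== PORT B =====
-- B's inner 'agg': divide-and-conquer (total, peak) over a nonempty list.
-- The [] branch is a totality guard only; B's Python never calls agg on an empty list.
def pvAgg (l : List (List (String × Int))) : Int × Int :=
  match l with
  | [] => (0, 0)
  | [w] => let t := pvWeekTotal w; (t, t)
  | a :: b :: rest =>
    let l' := a :: b :: rest
    let mid := l'.length / 2
    let left := pvAgg (l'.take mid)
    let right := pvAgg (l'.drop mid)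
    (left.1 + right.1, max left.2 right.2)
termination_by l.length
decreasing_by
  · simp [List.length_take]; omega
  · simp; omega

-- B's reversed loop for recent activity: counter k, break at k == 4
def pvRec (k : Int) (l : List (List (String × Int))) : Int :=
  match l with
  | [] => 0
  | w :: ws => if k = 4 then 0 else pvWeekTotal w + pvRec (k + 1) ws

def process_commit_activity_py_alt (activity_data : List (List (String × Int))) : List (String × Int) :=
  if activity_data.isEmpty then
    [("recent_activity", 0), ("peak_week", 0), ("total_commits", 0)]
  else
    let r := pvAgg activity_data
    let recent_activity := pvRec 0 activity_data.reverse
    [("recent_activity", recent_activity), ("peak_week", r.2), ("total_commits", r.1)]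

-- ===== PRECONDITION & SPEC =====
def Spec_process_commit_activity_py (activity_data : List (List (String × Int))) (out : List (String × Int)) : Prop := out = process_commit_activity_py_alt activity_data
instance (activity_data : List (List (String × Int))) (out : List (String × Int)) : Decidable (Spec_process_commit_activity_py activity_data out) := by unfold Spec_process_commit_activity_py; infer_instance

-- ===== CLAIM (what is proved, stated in full; the proofs are below) =====
def Claim_equal_process_commit_activity_py : Prop := ∀ (activity_data : List (List (String × Int))), Dom_process_commit_activity_py activity_data → Spec_process_commit_activity_py activity_data (process_commit_activity_py activity_data)

-- ===== LEMMAS AND PROOFS =====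

-- maximum of a nonempty list of ints, foldl form (A's peak shape via List.foldl_map)
def pvMaxL : List Int → Int
  | [] => 0
  | x :: xs => xs.foldl max x

lemma pv_foldl_max_shift (l : List Int) (a b : Int) :
    l.foldl max (max a b) = max a (l.foldl max b) := by
  induction l generalizing b with
  | nil => rfl
  | cons x xs ih => simp only [List.foldl_cons, max_assoc, ih]

lemma pv_maxL_append (xs ys : List Int) (hx : xs ≠ []) (hy : ys ≠ []) :
    pvMaxL (xs ++ ys) = max (pvMaxL xs) (pvMaxL ys) := by
  cases xs with
  | nil => exact absurd rfl hx
  | cons x xs' =>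
    cases ys with
    | nil => exact absurd rfl hy
    | cons y ys' =>
      simp only [pvMaxL, List.cons_append, List.foldl_cons, List.foldl_append]
      exact pv_foldl_max_shift ys' _ y

-- agg computes (sum of totals, max of totals)
lemma pv_agg_eq (l : List (List (String × Int))) (h : l ≠ []) :
    pvAgg l = ((l.map pvWeekTotal).sum, pvMaxL (l.map pvWeekTotal)) := by
  induction hn : l.length using Nat.strong_induction_on generalizing l with
  | _ n ih =>
    match l with
    | [] => exact absurd rfl h
    | [w] => simp [pvAgg, pvMaxL]
    | a :: b :: rest =>
      have hlen : (a :: b :: rest).length = n := hn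
      have h2 : 2 ≤ n := by simp at hlen; omega
      rw [pvAgg]
      have hmid : (a :: b :: rest).length / 2 = n / 2 := by rw [hlen]
      have htl : ((a :: b :: rest).take (n / 2)).length = n / 2 := by
        rw [List.length_take, hlen]; omega
      have hdl : ((a :: b :: rest).drop (n / 2)).length = n - n / 2 := by
        rw [List.length_drop, hlen]
      have htne : (a :: b :: rest).take (n / 2) ≠ [] := by
        intro hc; rw [hc] at htl; simp at htl; omega
      have hdne : (a :: b :: rest).drop (n / 2) ≠ [] := by
        intro hc; rw [hc] at hdl; simp at hdl; omega
      rw [hmid,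
        ih (n / 2) (by omega) _ htne htl,
        ih (n - n / 2) (by omega) _ hdne hdl]
      have hsplit : (a :: b :: rest) =
          (a :: b :: rest).take (n / 2) ++ (a :: b :: rest).drop (n / 2) :=
        (List.take_append_drop _ _).symm
      conv_rhs => rw [hsplit]
      rw [List.map_append, List.sum_append,
        pv_maxL_append _ _ (by simpa using htne) (by simpa using hdne)]

-- the reversed counter loop sums the first (4 - k) elements
lemma pv_rec_eq (l : List (List (String × Int))) (k : Int) (hk : 0 ≤ k) (hk4 : k ≤ 4) :
    pvRec k l = ((l.take (4 - k).toNat).map pvWeekTotal).sum := by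
  induction l generalizing k with
  | nil => simp [pvRec]
  | cons w ws ih =>
    rw [pvRec]
    split_ifs with h
    · subst h; simp
    · have h4 : (4 - k).toNat = (4 - (k + 1)).toNat + 1 := by omega
      rw [h4, List.take_succ_cons, List.map_cons, List.sum_cons,
        ih (k + 1) (by omega) (by omega)]

-- ===== VERDICT (by name: the statement is the Claim_ definition above) =====
theorem process_commit_activity_py_spec : Claim_equal_process_commit_activity_py := by
  intro ad _
  unfold Spec_process_commit_activity_py
  cases ad with
  | nil => rfl
  | cons w ws =>
    unfold process_commit_activity_py process_commit_activity_py_alt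
    rw [pv_agg_eq _ (by simp), pv_rec_eq _ 0 (by omega) (by omega)]
    have hsl : PySem.List.slice (w :: ws) (some (-4)) none
        = (w :: ws).drop ((w :: ws).length - 4) := by
      rw [PySem.List.slice_from_neg_ofNat (w :: ws) 4 (by omega)]
    have hpk : ws.foldl (fun acc wk => max acc (pvWeekTotal wk)) (pvWeekTotal w)
        = pvMaxL ((w :: ws).map pvWeekTotal) := by
      simp [pvMaxL, List.foldl_map]
    have hrec : (((w :: ws).reverse.take ((4 : Int) - 0).toNat).map pvWeekTotal).sum
        = (((w :: ws).drop ((w :: ws).length - 4)).map pvWeekTotal).sum := by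
      have h4 : ((4 : Int) - 0).toNat = 4 := by omega
      rw [h4, List.take_reverse, List.map_reverse, List.sum_reverse]
    simp only [hsl, hpk, hrec, List.isEmpty_cons, Bool.false_eq_true, if_false]
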